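-- pv_equiv track=rewrite | github.com/smaruf/python-ai-course | sorting-algorithms-project/animations/radix_sort_animation.py | radix_sort_with_frames
-- ===== SOURCE A (Python) =====
-- def radix_sort_with_frames(arr):
--     frames = []
--     arr = list(arr)
--     max_num = max(arr)
--     exp = 1
--     frames.append(list(arr))
--     while max_num // exp > 0:
--         arr = counting_sort_with_frames(arr, exp, frames)
--         exp *= 10
--     return frames
--
-- def counting_sort_with_frames(arr, exp, frames):
--     n = len(arr)
--     output = [0] * n
--     count = [0] * 10
--
--     # Count occurrences
--     for i in range(n):
--         index = arr[i] // exp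
--         count[index % 10] += 1
--
--     for i in range(1, 10):
--         count[i] += count[i - 1]
--
--     for i in range(n - 1, -1, -1):
--         index = arr[i] // exp
--         output[count[index % 10] - 1] = arr[i]
--         count[index % 10] -= 1
--
--     # Save frame after each counting sort pass
--     frames.append(list(output))
--     return output
-- ===== SOURCE B (Python) =====
-- def radix_sort_with_frames(arr):
--     frames = []
--     arr = list(arr)
--     max_num = max(arr)
--     exp = 1
--     frames.append(list(arr))
--     while max_num // exp > 0:
--         buckets = [[] for _ in range(10)]
--         for x in arr:
--             buckets[(x // exp) % 10].append(x)
--         output = []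
--         for b in buckets:
--             output.extend(b)
--         arr = output
--         frames.append(list(output))
--         exp *= 10
--     return frames
-- ===== Notes on version B (the rewrite author's own statement) =====
-- stated objective: simpler
-- what changed: Each counting-sort pass (count array, prefix-sum pass, reverse-order placement into a preallocated output) is replaced by a stable bucket-distribution pass: append each element left-to-right to buckets[(x//exp)%10] and concatenate the ten buckets; the outer digit loop is unchanged. Pre_ excludes the empty list, on which A (and B) raise ValueError from max(arr).
import Mathlib
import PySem

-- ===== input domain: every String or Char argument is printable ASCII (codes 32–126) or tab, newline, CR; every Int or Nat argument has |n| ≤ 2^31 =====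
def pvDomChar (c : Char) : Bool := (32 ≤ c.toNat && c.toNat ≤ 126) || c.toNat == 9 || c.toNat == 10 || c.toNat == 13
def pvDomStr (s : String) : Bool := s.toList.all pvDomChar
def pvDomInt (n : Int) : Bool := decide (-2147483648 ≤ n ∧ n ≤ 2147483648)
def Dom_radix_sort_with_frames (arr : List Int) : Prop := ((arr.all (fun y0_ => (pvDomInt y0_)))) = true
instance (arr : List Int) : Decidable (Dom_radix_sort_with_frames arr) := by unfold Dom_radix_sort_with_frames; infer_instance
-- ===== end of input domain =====

-- B replaces each counting-sort pass of A (count array, prefix sums, reverse placement)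
-- by a stable bucket-distribution pass (append to buckets[digit], concatenate); objective: simpler.

-- termination measure lemma for the shared while-loop shape (cited by both ports' decreasing_by)
theorem pvRadixMeasDec (m e : Int) (h : 0 < PySem.Int.floordiv m e) :
    m.natAbs / (e * 10).natAbs < m.natAbs / e.natAbs := by
  have he : e ≠ 0 := by
    rintro rfl
    simp [PySem.Int.floordiv, Int.fdiv_zero] at h
  have habs : e.natAbs ≤ m.natAbs := by
    rcases lt_or_gt_of_ne he with hneg | hpos
    · have h2 : 0 < PySem.Int.floordiv (-(-m)) (-(-e)) := by simpa using h
      rw [PySem.Int.floordiv_neg_neg] at h2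
      have := (PySem.Int.le_floordiv_iff_mul_le (a := -m) (b := -e) (q := 1) (by omega)).mp (by omega)
      omega
    · have := (PySem.Int.le_floordiv_iff_mul_le (a := m) (b := e) (q := 1) hpos).mp (by omega)
      omega
  have he' : 0 < e.natAbs := by omega
  have hq : 1 ≤ m.natAbs / e.natAbs := (Nat.one_le_div_iff he').mpr habs
  have hh : m.natAbs / (e * 10).natAbs = m.natAbs / e.natAbs / 10 := by
    rw [Int.natAbs_mul]
    simp [Nat.div_div_eq_div_mul]
  rw [hh]
  exact Nat.div_lt_self (by omega) (by omega)

-- ===== PORT A =====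
-- counting_sort_with_frames: the returned output list (the appended frame is this same list)
def pvCsortA (arr : List Int) (exp : Int) : List Int :=
  let n : Int := PySem.List.len arr
  let output : List Int := List.replicate n.toNat 0
  let count : List Int := List.replicate 10 0
  let count := arr.foldl (fun c x =>
      c.set (PySem.Int.mod (PySem.Int.floordiv x exp) 10).toNat
        (c.getD (PySem.Int.mod (PySem.Int.floordiv x exp) 10).toNat 0 + 1)) count
  let count := (PySem.List.pyRange 1 10 1).foldl (fun c i =>
      c.set i.toNat (c.getD i.toNat 0 + c.getD (i - 1).toNat 0)) count
  let oc := (PySem.List.pyRange (n - 1) (-1) (-1)).foldl (fun (oc : List Int × List Int) i =>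
      let x := arr.getD i.toNat 0
      let d := (PySem.Int.mod (PySem.Int.floordiv x exp) 10).toNat
      (oc.1.set (oc.2.getD d 0 - 1).toNat x, oc.2.set d (oc.2.getD d 0 - 1))) (output, count)
  oc.1

def pvLoopA (max_num : Int) (arr : List Int) (frames : List (List Int)) (exp : Int) :
    List (List Int) :=
  if 0 < PySem.Int.floordiv max_num exp then
    let out := pvCsortA arr exp
    pvLoopA max_num out (frames ++ [out]) (exp * 10)
  else frames
termination_by max_num.natAbs / exp.natAbs
decreasing_by exact pvRadixMeasDec _ _ (by assumption)

def radix_sort_with_frames (arr : List Int) : List (List Int) :=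
  let max_num := (PySem.List.max? arr (fun x => x)).getD 0
  pvLoopA max_num arr ([] ++ [arr]) 1

-- ===== PORT B =====
-- one bucket pass: distribute left-to-right into buckets[digit], then concatenate buckets 0..9
def pvCsortB (arr : List Int) (exp : Int) : List Int :=
  let buckets : List (List Int) := List.replicate 10 []
  let buckets := arr.foldl (fun bs x =>
      bs.set (PySem.Int.mod (PySem.Int.floordiv x exp) 10).toNat
        (bs.getD (PySem.Int.mod (PySem.Int.floordiv x exp) 10).toNat [] ++ [x])) buckets
  buckets.foldl (fun out b => out ++ b) []

def pvLoopB (max_num : Int) (arr : List Int) (frames : List (List Int)) (exp : Int) :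
    List (List Int) :=
  if 0 < PySem.Int.floordiv max_num exp then
    let out := pvCsortB arr exp
    pvLoopB max_num out (frames ++ [out]) (exp * 10)
  else frames
termination_by max_num.natAbs / exp.natAbs
decreasing_by exact pvRadixMeasDec _ _ (by assumption)

def radix_sort_with_frames_alt (arr : List Int) : List (List Int) :=
  let max_num := (PySem.List.max? arr (fun x => x)).getD 0
  pvLoopB max_num arr ([] ++ [arr]) 1

-- ===== PRECONDITION & SPEC =====
-- Pre_ excludes only the empty list, on which Python's max(arr) raises ValueError (in A and in B alike).
def Pre_radix_sort_with_frames (arr : List Int) : Prop := arr ≠ []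
instance (arr : List Int) : Decidable (Pre_radix_sort_with_frames arr) := by
  unfold Pre_radix_sort_with_frames; infer_instance

def pvWitness_radix_sort_with_frames : List Int := ([170, 45, 75, 90, 802, 24, 2, 66])

def Spec_radix_sort_with_frames (arr : List Int) (out : List (List Int)) : Prop :=
  out = radix_sort_with_frames_alt arr
instance (arr : List Int) (out : List (List Int)) :
    Decidable (Spec_radix_sort_with_frames arr out) := by
  unfold Spec_radix_sort_with_frames; infer_instance

-- ===== CLAIM (what is proved, stated in full; the proofs are below) =====
def Claim_equal_radix_sort_with_frames : Prop :=
  ∀ (arr : List Int), Dom_radix_sort_with_frames arr → Pre_radix_sort_with_frames arr →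
    Spec_radix_sort_with_frames arr (radix_sort_with_frames arr)

-- ===== LEMMAS AND PROOFS =====

theorem pvSet_map_range {α : Type} (n j : Nat) (f : Nat → α) (v : α) (hj : j < n) :
    ((List.range n).map f).set j v = (List.range n).map (fun i => if i = j then v else f i) := by
  apply List.ext_getElem
  · simp
  · intro i h1 h2
    simp only [List.getElem_set, List.getElem_map, List.getElem_range]
    rcases eq_or_ne i j with rfl | hne
    · simp
    · simp [hne, Ne.symm hne]

theorem pvGetD_map_range {α : Type} (n j : Nat) (f : Nat → α) (d : α) (hj : j < n) :
    ((List.range n).map f).getD j d = f j := by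
  rw [List.getD_eq_getElem?_getD]
  simp [hj]

theorem pvFoldr_congr {α β : Type} (l : List α) (f g : α → β → β) (st : β)
    (h : ∀ a ∈ l, ∀ b, f a b = g a b) : l.foldr f st = l.foldr g st := by
  induction l with
  | nil => rfl
  | cons x xs ih =>
    simp only [List.foldr_cons]
    rw [ih (fun a ha b => h a (by simp [ha]) b), h x (by simp)]

def pvDg (exp x : Int) : Nat := (PySem.Int.mod (PySem.Int.floordiv x exp) 10).toNat

def pvCnt (exp : Int) (j : Nat) (r : List Int) : Nat := r.countP (fun x => pvDg exp x == j)

theorem pvDg_lt (exp x : Int) : pvDg exp x < 10 := by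
  have h1 := PySem.Int.mod_nonneg (PySem.Int.floordiv x exp) (b := 10) (by omega)
  have h2 := PySem.Int.mod_lt (PySem.Int.floordiv x exp) (b := 10) (by omega)
  unfold pvDg; omega

theorem pvPhase1 (exp : Int) (arr : List Int) (f : Nat → Int) :
    arr.foldl (fun c x =>
        c.set (pvDg exp x) (c.getD (pvDg exp x) 0 + 1)) ((List.range 10).map f)
      = (List.range 10).map (fun j => f j + (pvCnt exp j arr : Int)) := by
  induction arr generalizing f with
  | nil => simp [pvCnt]
  | cons x xs ih =>
    simp only [List.foldl_cons]
    rw [pvGetD_map_range 10 _ f 0 (pvDg_lt exp x),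
        pvSet_map_range 10 _ f _ (pvDg_lt exp x), ih]
    apply List.map_congr_left
    intro j hj
    rcases eq_or_ne j (pvDg exp x) with rfl | hne
    · simp [pvCnt]
      ring
    · simp [hne, pvCnt, Ne.symm hne]

theorem pvBuckets (exp : Int) (arr : List Int) (f : Nat → List Int) :
    arr.foldl (fun bs x =>
        bs.set (pvDg exp x) (bs.getD (pvDg exp x) [] ++ [x])) ((List.range 10).map f)
      = (List.range 10).map (fun j => f j ++ arr.filter (fun x => pvDg exp x == j)) := by
  induction arr generalizing f with
  | nil => simp
  | cons x xs ih =>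
    simp only [List.foldl_cons]
    rw [pvGetD_map_range 10 _ f [] (pvDg_lt exp x),
        pvSet_map_range 10 _ f _ (pvDg_lt exp x), ih]
    apply List.map_congr_left
    intro j hj
    rcases eq_or_ne j (pvDg exp x) with rfl | hne
    · simp
    · simp [hne, Ne.symm hne]

theorem pvFoldr_range_getD {α β : Type} (l : List α) (d : α) (h : α → β → β) (st : β) :
    (List.range l.length).foldr (fun i acc => h (l.getD i d) acc) st = l.foldr h st := by
  induction l using List.reverseRecOn generalizing st with
  | nil => rfl
  | append_singleton ys y ih =>
    rw [List.length_append, List.length_singleton, List.range_succ, List.foldr_append]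
    simp only [List.foldr_cons, List.foldr_nil]
    have hy : (ys ++ [y]).getD ys.length d = y := by
      rw [List.getD_eq_getElem?_getD]
      simp
    rw [hy, List.foldr_append]
    simp only [List.foldr_cons, List.foldr_nil]
    rw [← ih (h y st)]
    apply pvFoldr_congr
    intro i hi b
    simp only [List.mem_range] at hi
    congr 1
    rw [List.getD_eq_getElem?_getD, List.getD_eq_getElem?_getD, List.getElem?_append_left hi]

theorem pvSet_flatten {α : Type} (pre post : List (List α)) (b : List α) (rel : Nat) (v : α)
    (hrel : rel < b.length) :
    ((pre ++ b :: post).flatten).set (pre.flatten.length + rel) v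
      = (pre ++ b.set rel v :: post).flatten := by
  rw [List.flatten_append, List.flatten_cons, List.flatten_append, List.flatten_cons]
  rw [List.set_append_right _ _ (by omega)]
  congr 1
  rw [Nat.add_sub_cancel_left]
  exact List.set_append_left _ _ hrel

theorem pvIndicator_sum (p : Nat → Prop) [DecidablePred p] (l : List Nat) :
    (l.map (fun j => if p j then 1 else 0)).sum = l.countP (fun j => p j) := by
  induction l with
  | nil => simp
  | cons a t ih => by_cases h : p a <;> simp [h, ih, Nat.add_comm]

theorem pvCnt_total (exp : Int) (arr : List Int) :
    ((List.range 10).map (fun j => pvCnt exp j arr)).sum = arr.length := by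
  induction arr with
  | nil => simp [pvCnt]
  | cons x xs ih =>
    have hstep : ∀ j, pvCnt exp j (x :: xs) = pvCnt exp j xs + (if pvDg exp x = j then 1 else 0) := by
      intro j
      simp [pvCnt, List.countP_cons]
    simp only [hstep]
    rw [List.length_cons, ← ih, List.sum_map_add]
    congr 1
    have hx := pvDg_lt exp x
    have h1 : (fun (j : Nat) => decide (pvDg exp x = j)) = (fun j => j == pvDg exp x) := by
      funext j
      rcases eq_or_ne j (pvDg exp x) with rfl | hne
      · simp
      · simp [hne, Ne.symm hne]
    rw [pvIndicator_sum]
    show (List.range 10).countP (fun j => decide (pvDg exp x = j)) = 1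
    rw [h1]
    show (List.range 10).count (pvDg exp x) = 1
    exact List.count_eq_one_of_mem (List.nodup_range) (by simpa using hx)

theorem pvFlatten_replicate (l : List Nat) (c : Nat → Nat) :
    ((l.map (fun j => List.replicate (c j) (0 : Int))).flatten)
      = List.replicate ((l.map c).sum) 0 := by
  induction l with
  | nil => rfl
  | cons a t ih =>
    simp only [List.map_cons, List.flatten_cons, ih, List.sum_cons, List.replicate_add]

theorem pvPhase2_aux (g : Nat → Int) : ∀ t : Nat, t ≤ 9 →
    (PySem.List.pyRange 1 (1 + (t : Int)) 1).foldl (fun c i =>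
        c.set i.toNat (c.getD i.toNat 0 + c.getD (i - 1).toNat 0)) ((List.range 10).map g)
      = (List.range 10).map (fun j =>
          if j ≤ t then ((List.range (j + 1)).map g).sum else g j) := by
  intro t
  induction t with
  | zero =>
    intro _
    rw [PySem.List.pyRange_one_eq_nil (by omega)]
    simp only [List.foldl_nil]
    apply List.map_congr_left
    intro j hj
    rcases Nat.eq_zero_or_pos j with rfl | hpos
    · simp
    · rw [if_neg (by omega)]
  | succ t ih =>
    intro ht
    have hcast : (1 + ((t : Nat) + 1 : Nat) : Int) = (1 + (t : Int)) + 1 := by push_cast; ring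
    rw [hcast, PySem.List.pyRange_one_succ_right (by omega), List.foldl_append,
        ih (by omega)]
    simp only [List.foldl_cons, List.foldl_nil]
    have h1 : ((1 : Int) + t).toNat = t + 1 := by omega
    have h2 : ((1 : Int) + t - 1).toNat = t := by omega
    rw [h1, h2]
    rw [pvGetD_map_range 10 (t + 1) _ 0 (by omega), pvGetD_map_range 10 t _ 0 (by omega)]
    rw [if_neg (by omega), if_pos (by omega)]
    rw [pvSet_map_range 10 (t + 1) _ _ (by omega)]
    apply List.map_congr_left
    intro j hj
    simp only [List.mem_range] at hj
    rcases eq_or_ne j (t + 1) with rfl | hne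
    · rw [if_pos rfl, if_pos (by omega)]
      rw [List.range_succ (n := t + 1), List.map_append, List.sum_append]
      simp [Int.add_comm]
    · rw [if_neg hne]
      by_cases hle : j ≤ t
      · rw [if_pos hle, if_pos (by omega)]
      · rw [if_neg (by omega), if_neg (by omega)]

theorem pvPhase2 (g : Nat → Int) :
    (PySem.List.pyRange 1 10 1).foldl (fun c i =>
        c.set i.toNat (c.getD i.toNat 0 + c.getD (i - 1).toNat 0)) ((List.range 10).map g)
      = (List.range 10).map (fun j => (((List.range (j + 1)).map g).sum)) := by
  have h := pvPhase2_aux g 9 (by omega)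
  have h10 : (1 : Int) + ((9 : Nat) : Int) = 10 := by norm_num
  rw [h10] at h
  rw [h]
  apply List.map_congr_left
  intro j hj
  simp only [List.mem_range] at hj
  rw [if_pos (by omega)]

def pvOff (B : Nat → List Int) (j : Nat) : Nat := ((List.range j).map (fun i => (B i).length)).sum

theorem pvRange10_decomp {α : Type} (j : Nat) (hj : j < 10) (F : Nat → α) :
    (List.range 10).map F
      = ((List.range j).map F) ++ F j :: ((List.range (9 - j)).map (fun k => F (j + 1 + k))) := by
  have h10 : 10 = j + ((9 - j) + 1) := by omega
  rw [h10, List.range_add, List.map_append]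
  congr 1
  rw [List.range_succ_eq_map]
  simp only [List.map_cons, List.map_map, Nat.add_zero]
  congr 1
  apply List.map_congr_left
  intro k hk
  simp only [Function.comp_apply]
  congr 1
  omega

theorem pvPlacement (exp : Int) (r : List Int) (B : Nat → List Int) (m : Nat → Nat)
    (hm : ∀ j, pvCnt exp j r ≤ m j) (hB : ∀ j, m j ≤ (B j).length) :
    r.foldr (fun x oc =>
        ((oc.1 : List Int).set ((oc.2 : List Int).getD (pvDg exp x) 0 - 1).toNat x,
          oc.2.set (pvDg exp x) (oc.2.getD (pvDg exp x) 0 - 1)))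
      (((List.range 10).map B).flatten,
        (List.range 10).map (fun j => ((pvOff B j + m j : Nat) : Int)))
      = (((List.range 10).map (fun j =>
            (B j).take (m j - pvCnt exp j r) ++ r.filter (fun x => pvDg exp x == j)
              ++ (B j).drop (m j))).flatten,
          (List.range 10).map (fun j => ((pvOff B j + (m j - pvCnt exp j r) : Nat) : Int))) := by
  induction r with
  | nil =>
    simp only [List.foldr_nil, pvCnt, List.countP_nil, List.filter_nil, Nat.sub_zero]
    congr 1
    congr 1
    apply List.map_congr_left
    intro j hj
    rw [List.append_nil, List.take_append_drop]
  | cons x xs ih =>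
    -- abbreviations
    set j₀ := pvDg exp x with hj₀
    have hj₀lt : j₀ < 10 := pvDg_lt exp x
    have hcntx : ∀ j, pvCnt exp j (x :: xs)
        = pvCnt exp j xs + (if j₀ = j then 1 else 0) := by
      intro j
      simp only [pvCnt, List.countP_cons]
      rcases eq_or_ne j₀ j with rfl | hne
      · simp [← hj₀]
      · simp [← hj₀, hne]
    have hm' : ∀ j, pvCnt exp j xs ≤ m j := by
      intro j
      have := hm j
      have := hcntx j
      omega
    have hm₀ : pvCnt exp j₀ xs + 1 ≤ m j₀ := by
      have := hm j₀
      rw [hcntx j₀, if_pos rfl] at this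
      omega
    rw [List.foldr_cons, ih hm']
    simp only
    -- the current blocks
    set Bc : Nat → List Int := fun j =>
      (B j).take (m j - pvCnt exp j xs) ++ xs.filter (fun y => pvDg exp y == j)
        ++ (B j).drop (m j) with hBc
    have hlenBc : ∀ j, (Bc j).length = (B j).length := by
      intro j
      have h1 := hm' j
      have h2 := hB j
      have hf : (xs.filter (fun y => pvDg exp y == j)).length = pvCnt exp j xs := by
        rw [pvCnt, List.countP_eq_length_filter]
      simp only [hBc, List.length_append, List.length_take, List.length_drop, hf]
      omega
    -- read the count at j₀
    rw [pvGetD_map_range 10 j₀ _ 0 hj₀lt]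
    have hposToNat : (((pvOff B j₀ + (m j₀ - pvCnt exp j₀ xs) : Nat) : Int) - 1).toNat
        = pvOff B j₀ + ((m j₀ - pvCnt exp j₀ xs) - 1) := by omega
    rw [hposToNat, Prod.mk.injEq]
    set F : Nat → List Int := fun j =>
      (B j).take (m j - pvCnt exp j (x :: xs)) ++ (x :: xs).filter (fun y => pvDg exp y == j)
        ++ (B j).drop (m j) with hF
    constructor
    · -- output component
      rw [pvRange10_decomp j₀ hj₀lt Bc]
      have hpreflat : (((List.range j₀).map Bc).flatten).length = pvOff B j₀ := by
        rw [List.length_flatten, List.map_map, pvOff]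
        congr 1
        apply List.map_congr_left
        intro i hi
        exact hlenBc i
      have hrel : (m j₀ - pvCnt exp j₀ xs) - 1 < (Bc j₀).length := by
        rw [hlenBc]
        have := hB j₀
        omega
      rw [← hpreflat, pvSet_flatten _ _ _ _ _ hrel]
      rw [pvRange10_decomp j₀ hj₀lt F]
      have hFeq : ∀ i, j₀ ≠ i → F i = Bc i := by
        intro i hne
        rw [hF, hBc]
        simp only
        rw [hcntx i, if_neg hne, List.filter_cons, if_neg (by simp [← hj₀, hne])]
        simp
      have hpre : (List.range j₀).map Bc = (List.range j₀).map F := by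
        apply List.map_congr_left
        intro i hi
        simp only [List.mem_range] at hi
        exact (hFeq i (by omega)).symm
      have hpost : (List.range (9 - j₀)).map (fun k => Bc (j₀ + 1 + k))
          = (List.range (9 - j₀)).map (fun k => F (j₀ + 1 + k)) := by
        apply List.map_congr_left
        intro k hk
        exact (hFeq (j₀ + 1 + k) (by omega)).symm
      have hblock : (Bc j₀).set ((m j₀ - pvCnt exp j₀ xs) - 1) x = F j₀ := by
        set t := m j₀ - pvCnt exp j₀ xs with ht
        have htpos : 1 ≤ t := by omega
        have htlen : t ≤ (B j₀).length := by
          have := hB j₀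
          omega
        rw [List.set_eq_take_append_cons_drop, if_pos hrel]
        have htake : (Bc j₀).take (t - 1) = (B j₀).take (t - 1) := by
          rw [hBc]
          simp only [List.append_assoc]
          rw [List.take_append_of_le_length (by rw [List.length_take]; omega),
              List.take_take]
          congr 1
          omega
        have hdrop : (Bc j₀).drop ((t - 1) + 1) = xs.filter (fun y => pvDg exp y == j₀)
            ++ (B j₀).drop (m j₀) := by
          rw [hBc]
          simp only [List.append_assoc]
          have h5 : (t - 1) + 1 = ((B j₀).take t).length := by
            rw [List.length_take]
            omega
          rw [h5, List.drop_append]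
          rw [List.drop_length, Nat.sub_self, List.drop_zero, List.nil_append]
        rw [htake, hdrop, hF]
        simp only
        rw [hcntx j₀, if_pos rfl, List.filter_cons, if_pos (by simp [← hj₀])]
        have h6 : m j₀ - (pvCnt exp j₀ xs + 1) = t - 1 := by omega
        rw [h6]
        simp
      rw [hpre, hpost, hblock]
    · -- count component
      rw [← hj₀, pvSet_map_range 10 j₀ _ _ hj₀lt]
      apply List.map_congr_left
      intro j hj
      simp only [List.mem_range] at hj
      rcases eq_or_ne j j₀ with rfl | hne
      · rw [if_pos rfl, hcntx _, if_pos rfl]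
        omega
      · rw [if_neg hne, hcntx j, if_neg (Ne.symm hne)]
        simp

theorem pvSumCast (l : List Nat) (c : Nat → Nat) :
    ((l.map (fun i => ((c i : Nat) : Int))).sum) = (((l.map c).sum : Nat) : Int) := by
  induction l with
  | nil => rfl
  | cons a t ih => simp [ih]

theorem pvCountdown {α β : Type} (l : List α) (d : α) (f : α → β → β) (st : β) :
    (PySem.List.pyRange ((l.length : Int) - 1) (-1) (-1)).foldl
        (fun acc i => f (l.getD i.toNat d) acc) st
      = l.foldr f st := by
  rw [PySem.List.pyRange_neg_one_eq_reverse]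
  have h1 : ((l.length : Int) - 1) + 1 = (l.length : Int) := by ring
  rw [h1, List.foldl_reverse]
  have h0 : (-1 : Int) + 1 = 0 := by norm_num
  rw [h0, PySem.List.pyRange_zero_nat, List.foldr_map]
  have h3 : ∀ i ∈ List.range l.length, ∀ b,
      (fun (i : Nat) acc => f (l.getD ((i : Int)).toNat d) acc) i b
        = (fun (i : Nat) acc => f (l.getD i d) acc) i b := by
    intro i hi b
    simp
  rw [pvFoldr_congr _ _ _ _ h3, pvFoldr_range_getD]

theorem pvCsortB_eq (arr : List Int) (exp : Int) :
    pvCsortB arr exp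
      = ((List.range 10).map (fun j => arr.filter (fun x => pvDg exp x == j))).flatten := by
  unfold pvCsortB
  simp only
  have hrep : (List.replicate 10 ([] : List Int)) = (List.range 10).map (fun _ => []) := by
    rw [List.map_const']
    simp
  have hlam : (fun (bs : List (List Int)) (x : Int) =>
      bs.set (PySem.Int.mod (PySem.Int.floordiv x exp) 10).toNat
        (bs.getD (PySem.Int.mod (PySem.Int.floordiv x exp) 10).toNat [] ++ [x]))
      = (fun bs x => bs.set (pvDg exp x) (bs.getD (pvDg exp x) [] ++ [x])) := rfl
  rw [hrep, hlam, pvBuckets, PySem.List.foldl_append_eq_flatten]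
  simp

theorem pvCsortA_eq (arr : List Int) (exp : Int) :
    pvCsortA arr exp
      = ((List.range 10).map (fun j => arr.filter (fun x => pvDg exp x == j))).flatten := by
  unfold pvCsortA
  simp only [PySem.List.len_eq, Int.toNat_natCast]
  have hrep : (List.replicate 10 (0 : Int)) = (List.range 10).map (fun _ => 0) := by
    rw [List.map_const']
    simp
  have hlam1 : (fun (c : List Int) (x : Int) =>
      c.set (PySem.Int.mod (PySem.Int.floordiv x exp) 10).toNat
        (c.getD (PySem.Int.mod (PySem.Int.floordiv x exp) 10).toNat 0 + 1))
      = (fun c x => c.set (pvDg exp x) (c.getD (pvDg exp x) 0 + 1)) := rfl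
  rw [hrep, hlam1, pvPhase1, pvPhase2]
  set B : Nat → List Int := fun j => List.replicate (pvCnt exp j arr) 0 with hBdef
  set mm : Nat → Nat := fun j => pvCnt exp j arr with hmm
  have hout : List.replicate arr.length (0 : Int) = ((List.range 10).map B).flatten := by
    rw [hBdef, pvFlatten_replicate (List.range 10) (fun j => pvCnt exp j arr), pvCnt_total]
  have hcnts : (List.range 10).map
        (fun j => ((List.range (j + 1)).map (fun j => 0 + (pvCnt exp j arr : Int))).sum)
      = (List.range 10).map (fun j => ((pvOff B j + mm j : Nat) : Int)) := by
    apply List.map_congr_left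
    intro j hj
    have hz : (fun (j : Nat) => (0 : Int) + (pvCnt exp j arr : Int))
        = fun j => ((pvCnt exp j arr : Nat) : Int) := by
      funext i
      ring
    rw [hz, pvSumCast, List.range_succ, List.map_append, List.sum_append]
    have hoff : (List.range j).map (fun i => pvCnt exp i arr)
        = (List.range j).map (fun i => (B i).length) := by
      apply List.map_congr_left
      intro i hi
      simp [hBdef]
    rw [hoff]
    simp [pvOff, hmm]
  have hlam2 : (fun (oc : List Int × List Int) (i : Int) =>
      ((oc.1.set (oc.2.getD (PySem.Int.mod (PySem.Int.floordiv (arr.getD i.toNat 0) exp) 10).toNat 0 - 1).toNat (arr.getD i.toNat 0),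
        oc.2.set (PySem.Int.mod (PySem.Int.floordiv (arr.getD i.toNat 0) exp) 10).toNat
          (oc.2.getD (PySem.Int.mod (PySem.Int.floordiv (arr.getD i.toNat 0) exp) 10).toNat 0 - 1)) : List Int × List Int))
      = (fun oc i =>
          (fun x (oc : List Int × List Int) =>
            (oc.1.set (oc.2.getD (pvDg exp x) 0 - 1).toNat x,
              oc.2.set (pvDg exp x) (oc.2.getD (pvDg exp x) 0 - 1))) (arr.getD i.toNat 0) oc) := rfl
  rw [hout, hcnts, hlam2, pvCountdown arr 0 (fun x (oc : List Int × List Int) =>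
        (oc.1.set (oc.2.getD (pvDg exp x) 0 - 1).toNat x,
          oc.2.set (pvDg exp x) (oc.2.getD (pvDg exp x) 0 - 1))) _,
      pvPlacement exp arr B mm (fun j => le_rfl)
      (fun j => by simp [hBdef, hmm])]
  simp only
  congr 1
  apply List.map_congr_left
  intro j hj
  rw [hmm]
  simp only [Nat.sub_self, List.take_zero, List.nil_append, hBdef, List.drop_replicate]
  simp

theorem pvCsort_eq (arr : List Int) (exp : Int) : pvCsortA arr exp = pvCsortB arr exp := by
  rw [pvCsortA_eq, pvCsortB_eq]

theorem pvLoop_eq (mn : Int) : ∀ (k : Nat) (arr : List Int) (frames : List (List Int)) (e : Int),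
    mn.natAbs / e.natAbs ≤ k → pvLoopA mn arr frames e = pvLoopB mn arr frames e := by
  intro k
  induction k with
  | zero =>
    intro arr frames e hk
    rw [pvLoopA.eq_def, pvLoopB.eq_def]
    by_cases hc : 0 < PySem.Int.floordiv mn e
    · exfalso
      have h1 := pvRadixMeasDec mn e hc
      generalize hA : mn.natAbs / (e * 10).natAbs = c at h1
      generalize hB : mn.natAbs / e.natAbs = a at h1 hk
      omega
    · rw [if_neg hc, if_neg hc]
  | succ k ih =>
    intro arr frames e hk
    rw [pvLoopA.eq_def, pvLoopB.eq_def]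
    by_cases hc : 0 < PySem.Int.floordiv mn e
    · rw [if_pos hc, if_pos hc]
      simp only
      rw [pvCsort_eq]
      refine ih _ _ _ ?_
      have h1 := pvRadixMeasDec mn e hc
      generalize hA : mn.natAbs / (e * 10).natAbs = c at h1 ⊢
      generalize hB : mn.natAbs / e.natAbs = a at h1 hk
      omega
    · rw [if_neg hc, if_neg hc]

-- ===== VERDICT (by name: the statement is the Claim_ definition above) =====
theorem radix_sort_with_frames_spec : Claim_equal_radix_sort_with_frames := by
  intro arr _ _
  unfold Spec_radix_sort_with_frames radix_sort_with_frames radix_sort_with_frames_alt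
  exact pvLoop_eq _ (((PySem.List.max? arr (fun x => x)).getD 0).natAbs) arr _ 1 (by simp)
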